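-- pv_equiv track=rewrite | github.com/PierreV23/AdventOfCode | 2024/day07/p1.py | rec
-- ===== SOURCE A (Python) =====
-- def rec(ns: list[int], res: int):
--     if len(ns) == 2:
--         a, b = ns
--         if a + b == res or a * b == res:
--             return True
--     else:
--         for op in (int.__mul__, int.__add__):
--             ls = ns[1:]
--             ls[0] = op(ns[0], ls[0])
--             r = rec(ls, res)
--             if r:
--                 return True
--     return False
-- ===== SOURCE B (Python) =====
-- def rec(ns: list[int], res: int):
--     # Work backwards from res over the numbers taken right-to-left:
--     # a last '+ x' step needs t - x reachable, a last '* x' step needs x to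
--     # divide t exactly (or x == 0, when any prefix works iff t == 0).
--     def can(r, t):
--         last, rest = r[0], r[1:]
--         if not rest:
--             return last == t
--         if can(rest, t - last):
--             return True
--         if last != 0:
--             return t % last == 0 and can(rest, t // last)
--         return t == 0
--     return can(ns[::-1], res)
-- ===== Notes on version B (the rewrite author's own statement) =====
-- stated objective: faster
-- what changed: B searches backwards from res (undoing + by subtraction and * only when the last number divides the target exactly) instead of A's forward enumeration of all 2^(n-1) operator sequences, so the multiply branch is pruned whenever divisibility fails.
import Mathlib
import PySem

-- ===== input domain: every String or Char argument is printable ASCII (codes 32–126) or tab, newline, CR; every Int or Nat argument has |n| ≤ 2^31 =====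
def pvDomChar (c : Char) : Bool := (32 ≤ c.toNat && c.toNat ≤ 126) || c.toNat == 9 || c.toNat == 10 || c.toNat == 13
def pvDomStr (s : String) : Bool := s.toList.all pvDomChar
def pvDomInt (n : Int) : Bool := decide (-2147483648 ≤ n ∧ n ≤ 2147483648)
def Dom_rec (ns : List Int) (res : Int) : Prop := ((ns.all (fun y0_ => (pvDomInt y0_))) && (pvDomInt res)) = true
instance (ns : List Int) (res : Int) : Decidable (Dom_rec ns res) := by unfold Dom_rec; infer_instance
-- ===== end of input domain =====

-- B replaces A's forward enumeration of all operator sequences by a backward search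
-- from res (undo + by subtraction, undo * only when the divisibility test passes).

-- ===== PORT A =====
-- Literal port of A: len==2 base case, else try mul then add on the first two elements.
def rec (ns : List Int) (res : Int) : Bool :=
  match ns with
  | a :: b :: rest =>
    if (a :: b :: rest).length = 2 then decide (a + b = res) || decide (a * b = res)
    else rec ((a * b) :: rest) res || rec ((a + b) :: rest) res
  | _ => false   -- Python raises IndexError here (len < 2); excluded by Pre_rec
termination_by ns.length
decreasing_by all_goals simp

-- ===== PORT B =====
-- port of Source B's helper `can`: r = remaining numbers rightmost-first, t = current target
def canRev : List Int → Int → Bool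
  | [], _ => false   -- Python raises IndexError here (r[0] on empty); excluded by Pre_rec
  | last :: rest, t =>
    if rest = [] then decide (last = t)
    else
      canRev rest (t - last) ||
        (if last ≠ 0 then
          decide (PySem.Int.mod t last = 0) && canRev rest (PySem.Int.floordiv t last)
         else decide (t = 0))

def rec_alt (ns : List Int) (res : Int) : Bool := canRev ns.reverse res

-- ===== PRECONDITION & SPEC =====
-- Pre_rec excludes exactly the lists of length < 2, on which A raises IndexError.
def Pre_rec (ns : List Int) (res : Int) : Prop := 2 ≤ ns.length
instance (ns : List Int) (res : Int) : Decidable (Pre_rec ns res) := by unfold Pre_rec; infer_instance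
def pvWitness_rec : List Int × Int := ([2, 3, 4], 20)

def Spec_rec (ns : List Int) (res : Int) (out : Bool) : Prop := out = rec_alt ns res
instance (ns : List Int) (res : Int) (out : Bool) : Decidable (Spec_rec ns res out) := by unfold Spec_rec; infer_instance

-- ===== CLAIM (what is proved, stated in full; the proofs are below) =====
def Claim_equal_rec : Prop := ∀ (ns : List Int) (res : Int), Dom_rec ns res → Pre_rec ns res → Spec_rec ns res (rec ns res)

-- ===== LEMMAS AND PROOFS =====

-- forward-evaluation reference function: pvF a xs res ↔ res is reachable from
-- accumulator a by folding +/* through xs left-to-right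
def pvF : Int → List Int → Int → Bool
  | a, [], res => decide (a = res)
  | a, b :: xs, res => pvF (a * b) xs res || pvF (a + b) xs res

lemma rec_eq_pvF (rest : List Int) : ∀ (a b res : Int), rec (a :: b :: rest) res = pvF a (b :: rest) res := by
  induction rest with
  | nil =>
    intro a b res
    simp [rec, pvF, Bool.or_comm]
  | cons c rest ih =>
    intro a b res
    rw [rec]
    rw [if_neg (by simp)]
    rw [ih, ih]
    rfl

lemma undo_mul (a b res : Int) (hb : b ≠ 0) :
    decide (a * b = res) = (decide (PySem.Int.mod res b = 0) && decide (a = PySem.Int.floordiv res b)) := by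
  have hdm := PySem.Int.floordiv_mul_add_mod res b
  by_cases h : a * b = res
  · have hdvd : b ∣ res := ⟨a, by rw [← h]; ring⟩
    have hm : PySem.Int.mod res b = 0 := (PySem.Int.mod_eq_zero_iff_dvd res b).mpr hdvd
    have hfd : PySem.Int.floordiv res b * b = res := by omega
    have hq : a = PySem.Int.floordiv res b := mul_right_cancel₀ hb (h.trans hfd.symm)
    simp only [hm, decide_true, Bool.true_and, decide_eq_decide]
    exact ⟨fun hx => mul_right_cancel₀ hb (hx.trans hfd.symm), fun hx => by rw [hx]; exact hfd⟩
  · simp only [h, decide_false]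
    by_cases hm : PySem.Int.mod res b = 0
    · by_cases hq : a = PySem.Int.floordiv res b
      · exfalso; apply h; rw [hq]; rw [hm] at hdm; omega
      · simp [hm, hq]
    · simp [hm]

-- backward step: appending b to the list is undone by subtracting / dividing the target
lemma pvF_append (xs : List Int) : ∀ (a b res : Int),
    pvF a (xs ++ [b]) res =
      (pvF a xs (res - b) ||
        (if b ≠ 0 then decide (PySem.Int.mod res b = 0) && pvF a xs (PySem.Int.floordiv res b)
         else decide (res = 0))) := by
  induction xs with
  | nil =>
    intro a b res
    have hadd : decide (a + b = res) = decide (a = res - b) := by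
      by_cases h : a + b = res
      · have h2 : a = res - b := by omega
        simp [h, h2]
      · have h2 : ¬ a = res - b := by omega
        simp [h2]
        omega
    by_cases hb : b = 0
    · subst hb
      simp only [List.nil_append, pvF, ne_eq, not_true_eq_false, if_false]
      rw [hadd]
      have hmul : decide (a * 0 = res) = decide (res = 0) := by
        by_cases h : res = 0 <;> simp [h, eq_comm]
      rw [hmul, Bool.or_comm]
    · simp only [List.nil_append, pvF]
      rw [if_pos hb, undo_mul a b res hb, hadd, Bool.or_comm]
  | cons c xs ih =>
    intro a b res
    simp only [List.cons_append, pvF]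
    rw [ih, ih]
    by_cases hb : b = 0
    · subst hb
      simp only [ne_eq, not_true_eq_false, if_false]
      cases pvF (a * c) xs (res - 0) <;> cases pvF (a + c) xs (res - 0) <;>
        cases decide (res = 0) <;> simp
    · rw [if_pos hb, if_pos hb, if_pos hb]
      cases pvF (a * c) xs (res - b) <;> cases pvF (a + c) xs (res - b) <;>
        cases decide (PySem.Int.mod res b = 0) <;>
        cases pvF (a * c) xs (PySem.Int.floordiv res b) <;>
        cases pvF (a + c) xs (PySem.Int.floordiv res b) <;> simp

lemma canRev_eq_pvF (r : List Int) : ∀ (a res : Int), canRev (r ++ [a]) res = pvF a r.reverse res := by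
  induction r with
  | nil => intro _ res; simp [canRev, pvF]
  | cons c r ih =>
    intro a res
    have hne : r ++ [a] ≠ [] := by simp
    simp only [List.cons_append, canRev, if_neg hne]
    rw [ih, ih]
    rw [List.reverse_cons, pvF_append]

theorem rec_spec : Claim_equal_rec := by
  intro ns res _ hpre
  unfold Spec_rec rec_alt
  match ns, hpre with
  | x :: y :: rest, _ =>
    have h1 : (x :: y :: rest).reverse = (y :: rest).reverse ++ [x] := by simp
    rw [h1, canRev_eq_pvF, List.reverse_reverse, rec_eq_pvF]
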